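-- pv_equiv track=rewrite | github.com/Liu-congo/collections | cs61b/chapter1.py | windowPosSum
-- ===== SOURCE A (Python) =====
-- def windowPosSum(a: list, n: int) -> list:
--     """
--     :param a: a list of int array
--     :param n: window size
--     :return: replaces each element a[i] with the sum of a[i] through a[i + n],
--              but only if a[i] is positive valued.If there are not enough values
--              because we reach the end of the array, we sum only as many values as we have.
--     """
--     output = []
--     for i, a_i in enumerate(a):
--         if a_i > 0:
--             cur = 0
--             for j, a_j in enumerate(a[i:]):
--                 if j > n:
--                     break
--                 cur += a_j
--             output.append(cur)
--         else:
--             output.append(a_i)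
--     return output
-- ===== SOURCE B (Python) =====
-- def windowPosSum(a: list, n: int) -> list:
--     # Prefix-sum array: each positive element's window sum is one subtraction.
--     pref = [0]
--     for x in a:
--         pref.append(pref[-1] + x)
--     w = n + 1 if n >= 0 else 0
--     L = len(a)
--     out = []
--     for i, x in enumerate(a):
--         if x > 0:
--             out.append(pref[min(i + w, L)] - pref[i])
--         else:
--             out.append(x)
--     return out
-- ===== Notes on version B (the rewrite author's own statement) =====
-- stated objective: faster
-- what changed: B precomputes a prefix-sum array once and obtains each positive element's window sum by a single subtraction, removing A's inner scan over a[i:].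
import Mathlib
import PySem

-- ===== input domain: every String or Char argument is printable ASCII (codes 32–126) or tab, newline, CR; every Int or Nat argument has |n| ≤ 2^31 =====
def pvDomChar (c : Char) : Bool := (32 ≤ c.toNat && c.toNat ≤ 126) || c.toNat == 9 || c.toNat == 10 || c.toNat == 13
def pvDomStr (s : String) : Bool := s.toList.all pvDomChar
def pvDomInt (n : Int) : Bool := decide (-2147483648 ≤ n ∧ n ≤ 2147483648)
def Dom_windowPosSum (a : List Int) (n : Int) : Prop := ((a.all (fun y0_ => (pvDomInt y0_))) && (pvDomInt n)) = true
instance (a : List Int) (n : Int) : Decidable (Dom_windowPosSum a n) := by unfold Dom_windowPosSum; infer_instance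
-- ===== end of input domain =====

-- B replaces A's inner forward scan by a prefix-sum array and one subtraction per positive element (asymptotically faster).

-- ===== PORT A =====
-- inner loop: `for j, a_j in enumerate(a[i:]): if j > n: break; cur += a_j`
def pvInnerA (n : Int) : List Int → Int → Int → Int
  | [], _, cur => cur
  | aj :: rest, j, cur => if j > n then cur else pvInnerA n rest (j + 1) (cur + aj)

def windowPosSum (a : List Int) (n : Int) : List Int :=
  (PySem.List.enumerate a).foldl (fun output p =>
    if p.2 > 0 then output ++ [pvInnerA n (PySem.List.slice a (some p.1) none) 0 0]
    else output ++ [p.2]) []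

-- ===== PORT B =====
def windowPosSum_alt (a : List Int) (n : Int) : List Int :=
  let pref := a.foldl (fun p x => p ++ [PySem.List.pyGetD p (-1) 0 + x]) [0]
  let w : Int := if n ≥ 0 then n + 1 else 0
  let L : Int := a.length
  (PySem.List.enumerate a).foldl (fun out p =>
    if p.2 > 0 then out ++ [PySem.List.pyGetD pref (min (p.1 + w) L) 0 - PySem.List.pyGetD pref p.1 0]
    else out ++ [p.2]) []

-- ===== PRECONDITION & SPEC =====
def Spec_windowPosSum (a : List Int) (n : Int) (out : List Int) : Prop := out = windowPosSum_alt a n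
instance (a : List Int) (n : Int) (out : List Int) : Decidable (Spec_windowPosSum a n out) := by unfold Spec_windowPosSum; infer_instance

-- ===== CLAIM (what is proved, stated in full; the proofs are below) =====
def Claim_equal_windowPosSum : Prop := ∀ (a : List Int) (n : Int), Dom_windowPosSum a n → Spec_windowPosSum a n (windowPosSum a n)

-- ===== LEMMAS AND PROOFS =====

-- A's inner loop sums the first (n+1-j)⁺ elements.
theorem pvInnerA_sum (n : Int) (l : List Int) : ∀ (j cur : Int),
    pvInnerA n l j cur = cur + (l.take (n + 1 - j).toNat).sum := by
  induction l with
  | nil => intro j cur; simp [pvInnerA]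
  | cons aj rest ih =>
    intro j cur
    by_cases h : j > n
    · have : (n + 1 - j).toNat = 0 := by omega
      simp [pvInnerA, h, this]
    · have hk : (n + 1 - j).toNat = (n + 1 - (j + 1)).toNat + 1 := by omega
      simp only [pvInnerA, if_neg h, ih (j + 1) (cur + aj), hk, List.take_succ_cons,
        List.sum_cons]
      ring

-- B's prefix array is the list of prefix sums.
theorem pref_eq (a : List Int) :
    a.foldl (fun p x => p ++ [PySem.List.pyGetD p (-1) 0 + x]) [0]
      = (List.range (a.length + 1)).map (fun k => ((a.take k).sum : Int)) := by
  induction a using List.reverseRecOn with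
  | nil => simp
  | append_singleton as x ih =>
    rw [List.foldl_append, List.foldl_cons, List.foldl_nil, ih]
    have hsplit : (List.range (as.length + 1)).map (fun k => ((as.take k).sum : Int))
        = (List.range as.length).map (fun k => ((as.take k).sum : Int))
          ++ [((as.take as.length).sum : Int)] := by
      rw [List.range_succ, List.map_append]; simp
    rw [hsplit, PySem.List.pyGetD_neg_one_append_singleton]
    have hlen : (as ++ [x]).length + 1 = (as.length + 1) + 1 := by simp
    rw [hlen, List.range_succ, List.map_append]
    congr 1
    · rw [← hsplit]
      apply List.map_congr_left
      intro k hk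
      have hk' : k < as.length + 1 := List.mem_range.mp hk
      rw [List.take_append_of_le_length (by omega)]
    · simp [List.take_length]

-- getD on the prefix array.
theorem pref_getD (a : List Int) (k : Nat) (hk : k ≤ a.length) :
    ((List.range (a.length + 1)).map (fun k => ((a.take k).sum : Int))).getD k 0
      = (a.take k).sum := by
  rw [List.getD_eq_getElem?_getD, List.getElem?_map]
  simp [List.getElem?_range (show k < a.length + 1 by omega)]

-- The window sum as a prefix difference.
theorem window_as_diff (a : List Int) (k w' : Nat) (hk : k < a.length) :
    ((a.drop k).take w').sum
      = (a.take (min (k + w') a.length)).sum - ((a.take k).sum : Int) := by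
  have hmin : min (k + w') a.length = k + min w' (a.length - k) := by omega
  rw [hmin, List.take_add, List.sum_append]
  have : (a.drop k).take w' = (a.drop k).take (min w' (a.length - k)) := by
    rcases le_or_gt w' (a.length - k) with h | h
    · rw [min_eq_left h]
    · rw [min_eq_right (by omega),
        List.take_of_length_le (show (a.drop k).length ≤ w' by
          simp only [List.length_drop]; omega),
        List.take_of_length_le (show (a.drop k).length ≤ a.length - k by
          simp only [List.length_drop]; omega)]
  rw [← this]; ring

theorem windowPosSum_eq_alt (a : List Int) (n : Int) :
    windowPosSum a n = windowPosSum_alt a n := by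
  simp only [windowPosSum, windowPosSum_alt]
  rw [pref_eq]
  rw [show (fun (output : List Int) (p : Int × Int) =>
        if p.2 > 0 then output ++ [pvInnerA n (PySem.List.slice a (some p.1) none) 0 0]
        else output ++ [p.2])
      = (fun output p => output ++ [if p.2 > 0
          then pvInnerA n (PySem.List.slice a (some p.1) none) 0 0 else p.2]) from by
    funext o p; by_cases h : p.2 > 0 <;> simp [h]]
  rw [show (fun (out : List Int) (p : Int × Int) =>
        if p.2 > 0 then out ++ [PySem.List.pyGetD
            ((List.range (a.length + 1)).map (fun k => ((a.take k).sum : Int)))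
            (min (p.1 + if n ≥ 0 then n + 1 else 0) (a.length : Int)) 0
          - PySem.List.pyGetD
            ((List.range (a.length + 1)).map (fun k => ((a.take k).sum : Int))) p.1 0]
        else out ++ [p.2])
      = (fun out p => out ++ [if p.2 > 0
          then PySem.List.pyGetD
            ((List.range (a.length + 1)).map (fun k => ((a.take k).sum : Int)))
            (min (p.1 + if n ≥ 0 then n + 1 else 0) (a.length : Int)) 0
          - PySem.List.pyGetD
            ((List.range (a.length + 1)).map (fun k => ((a.take k).sum : Int))) p.1 0
          else p.2]) from by
    funext o p; by_cases h : p.2 > 0 <;> simp [h]]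
  rw [PySem.List.foldl_append_singleton_eq_map, PySem.List.foldl_append_singleton_eq_map]
  simp only [List.nil_append]
  apply List.map_congr_left
  intro p hp
  obtain ⟨k, hk, rfl⟩ := (PySem.List.mem_enumerate_iff a 0 p).mp hp
  by_cases hpos : a[k] > 0
  · simp only [hpos, if_true, zero_add]
    rw [PySem.List.slice_from_natCast, pvInnerA_sum, zero_add]
    set w' : Nat := (n + 1).toNat with hw'
    have hsub : (n + 1 - 0).toNat = w' := by omega
    rw [hsub]
    have hidx : min ((k : Int) + if n ≥ 0 then n + 1 else 0) (a.length : Int)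
        = ((min (k + w') a.length : Nat) : Int) := by
      by_cases hn : n ≥ 0
      · simp only [hn, if_true]
        have : ((k : Int) + (n + 1)) = ((k + w' : Nat) : Int) := by push_cast; omega
        rw [this]; push_cast; omega
      · simp only [hn, if_false]
        have hw0 : w' = 0 := by omega
        rw [hw0]; push_cast; omega
    rw [hidx, PySem.List.pyGetD_natCast, PySem.List.pyGetD_natCast,
      pref_getD a _ (by omega), pref_getD a k (by omega),
      window_as_diff a k w' hk]
  · simp [hpos]

-- ===== VERDICT (by name: the statement is the Claim_ definition above) =====
theorem windowPosSum_spec : Claim_equal_windowPosSum := by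
  intro a n _
  unfold Spec_windowPosSum
  exact windowPosSum_eq_alt a n
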